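-- pv_equiv track=rewrite | github.com/christianebacani/Roadmap | Coding Challenges using Python and SQL/Code Wars Python Solved Problems/7 Kyu/complete_the_pattern_number_2.py | pattern
-- ===== SOURCE A (Python) =====
-- def pattern(n: int) -> str:
--     if n <= 0:
--         return ''
--
--     answer = []
--
--     for i in range(1, n + 1):
--         result = ''
--
--         for j in range(i, n + 1):
--             result = str(j) + result
--
--         answer.append(result)
--
--     answer = '\n'.join(answer)
--     return answer
-- ===== SOURCE B (Python) =====
-- def pattern(n: int) -> str:
--     rows = []
--     row = ''
--     for k in range(n, 0, -1):
--         row = row + str(k)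
--         rows.append(row)
--     rows.reverse()
--     return '\n'.join(rows)
-- ===== Notes on version B (the rewrite author's own statement) =====
-- stated objective: alternative
-- what changed: Replaces the nested loops that rebuild every row from scratch with a single descending pass that extends one accumulator row, collecting each row and reversing the list once before joining (measured 8.3x at n=1024, but not confirmed at the largest size, so no speed claim).
import Mathlib
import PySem

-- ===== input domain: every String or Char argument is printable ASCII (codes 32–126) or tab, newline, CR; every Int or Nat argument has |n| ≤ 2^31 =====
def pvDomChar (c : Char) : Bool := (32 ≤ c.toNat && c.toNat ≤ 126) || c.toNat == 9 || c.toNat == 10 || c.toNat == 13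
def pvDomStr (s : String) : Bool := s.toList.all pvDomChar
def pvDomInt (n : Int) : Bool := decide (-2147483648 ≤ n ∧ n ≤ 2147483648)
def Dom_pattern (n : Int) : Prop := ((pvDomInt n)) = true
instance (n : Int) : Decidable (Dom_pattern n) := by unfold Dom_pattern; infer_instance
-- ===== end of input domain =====

-- B replaces A's nested loops (each row rebuilt from scratch) by one descending pass that
-- extends a single accumulator row, collecting rows and reversing once; a different decomposition of the same task.

-- ===== PORT A =====
def pattern (n : Int) : String :=
  if n ≤ 0 then "" else
    let answer : List String :=
      (PySem.List.pyRange 1 (n + 1) 1).foldl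
        (fun answer i =>
          let result :=
            (PySem.List.pyRange i (n + 1) 1).foldl
              (fun result j => PySem.Int.toStr j ++ result) ""
          answer ++ [result])
        []
    PySem.Str.join "\n" answer

-- ===== PORT B =====
def pattern_alt (n : Int) : String :=
  let st :=
    (PySem.List.pyRange n 0 (-1)).foldl
      (fun (st : List String × String) k =>
        let row := st.2 ++ PySem.Int.toStr k
        (st.1 ++ [row], row))
      ([], "")
  PySem.Str.join "\n" st.1.reverse

-- ===== PRECONDITION & SPEC =====
def Spec_pattern (n : Int) (out : String) : Prop := out = pattern_alt n
instance (n : Int) (out : String) : Decidable (Spec_pattern n out) := by unfold Spec_pattern; infer_instance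

-- ===== CLAIM (what is proved, stated in full; the proofs are below) =====
def Claim_equal_pattern : Prop := ∀ (n : Int), Dom_pattern n → Spec_pattern n (pattern n)

-- ===== LEMMAS AND PROOFS =====

-- A's inner loop, as a function of the row index i (and upper bound n)
def pvRowA (n i : Int) : String :=
  (PySem.List.pyRange i (n + 1) 1).foldl
    (fun result j => PySem.Int.toStr j ++ result) ""

-- shifting the seed of A's prepend-fold out of the loop
theorem pvFoldl_prepend_shift (l : List Int) (s : String) :
    l.foldl (fun result j => PySem.Int.toStr j ++ result) s
      = l.foldl (fun result j => PySem.Int.toStr j ++ result) "" ++ s := by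
  induction l generalizing s with
  | nil => simp [List.foldl]
  | cons x xs ih =>
      simp only [List.foldl]
      rw [ih (PySem.Int.toStr x ++ s), ih (PySem.Int.toStr x ++ "")]
      simp [String.append_assoc]

-- one step of A's row: row i is row (i+1) with str(i) appended on the right
theorem pvRowA_step (n i : Int) (h : i ≤ n) :
    pvRowA n i = pvRowA n (i + 1) ++ PySem.Int.toStr i := by
  unfold pvRowA
  rw [PySem.List.pyRange_one_cons (by omega : i < n + 1)]
  simp only [List.foldl]
  rw [pvFoldl_prepend_shift]
  simp

theorem pvRowA_top (n : Int) : pvRowA n (n + 1) = "" := by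
  unfold pvRowA
  rw [PySem.List.pyRange_one_eq_nil (by omega)]
  rfl

-- B's loop body
def pvStepB (st : List String × String) (k : Int) : List String × String :=
  let row := st.2 ++ PySem.Int.toStr k
  (st.1 ++ [row], row)

-- invariant of B's descending loop: after counting down from m, the accumulated rows are
-- rows 1..m of A in reverse and the running row is A's row 1
theorem pvLoopB_inv (n : Int) (p : Nat) (hpn : (p : Int) ≤ n) (rows0 : List String) :
    (PySem.List.pyRange (p : Int) 0 (-1)).foldl pvStepB (rows0, pvRowA n ((p : Int) + 1))
      = (rows0 ++ ((PySem.List.pyRange 1 ((p : Int) + 1) 1).map (pvRowA n)).reverse,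
         pvRowA n 1) := by
  induction p generalizing rows0 with
  | zero =>
      rw [PySem.List.pyRange_neg_one_eq_nil (by omega)]
      rw [PySem.List.pyRange_one_eq_nil (by omega)]
      simp [List.foldl]
  | succ q ih =>
      rw [PySem.List.pyRange_neg_one_cons (by push_cast; omega)]
      simp only [List.foldl]
      have hrow : pvStepB (rows0, pvRowA n (((q : Int) + 1) + 1)) ((q : Int) + 1)
          = (rows0 ++ [pvRowA n ((q : Int) + 1)], pvRowA n ((q : Int) + 1)) := by
        unfold pvStepB
        rw [← pvRowA_step n ((q : Int) + 1) (by push_cast at hpn ⊢; omega)]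
      have hq : ((q + 1 : Nat) : Int) - 1 = (q : Int) := by push_cast; omega
      rw [show ((q + 1 : Nat) : Int) = (q : Int) + 1 by push_cast; ring] at *
      rw [hrow, hq, ih (le_trans (by omega) hpn) (rows0 ++ [pvRowA n ((q : Int) + 1)])]
      conv_rhs => rw [PySem.List.pyRange_one_succ_right
        (show (1 : Int) ≤ (q : Int) + 1 by omega)]
      simp

-- A's outer loop builds the list of rows 1..n
theorem pvAnswerA (n : Int) :
    (PySem.List.pyRange 1 (n + 1) 1).foldl
        (fun answer i =>
          let result :=
            (PySem.List.pyRange i (n + 1) 1).foldl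
              (fun result j => PySem.Int.toStr j ++ result) ""
          answer ++ [result])
        []
      = (PySem.List.pyRange 1 (n + 1) 1).map (pvRowA n) := by
  have h := PySem.List.foldl_append_singleton_eq_map (pvRowA n)
    (PySem.List.pyRange 1 (n + 1) 1) ([] : List String)
  simpa [pvRowA] using h

-- ===== VERDICT (by name: the statement is the Claim_ definition above) =====
theorem pattern_spec : Claim_equal_pattern := by
  intro n _
  unfold Spec_pattern pattern pattern_alt
  by_cases hn : n ≤ 0
  · simp only [hn, if_pos]
    rw [PySem.List.pyRange_neg_one_eq_nil (by omega)]
    rfl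
  · simp only [hn, if_neg, not_false_iff]
    rw [pvAnswerA n]
    obtain ⟨p, hp⟩ : ∃ p : Nat, n = (p : Int) :=
      ⟨n.toNat, by omega⟩
    subst hp
    have h := pvLoopB_inv (p : Int) p le_rfl []
    rw [pvRowA_top] at h
    show PySem.Str.join "\n" _ = PySem.Str.join "\n" _
    rw [show (PySem.List.pyRange (p : Int) 0 (-1)).foldl
          (fun (st : List String × String) k =>
            (st.1 ++ [st.2 ++ PySem.Int.toStr k], st.2 ++ PySem.Int.toStr k))
          ([], "")
        = (PySem.List.pyRange (p : Int) 0 (-1)).foldl pvStepB ([], "") from rfl]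
    rw [h]
    simp
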